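-- pv_equiv track=rewrite | github.com/paulosergiocf/AmigoSecreto | amigoSecreto/usecases/utils.py | gerarDiagramacao
-- ===== SOURCE A (Python) =====
-- def gerarDiagramacao(lista):
--     """
--     Args:
--         lista: de dados.
--     Returns:
--         lista: lista com matriz para prencher tela em tres colunas.
--     """
--     lista_diagramar =list()
--     for resultado in lista:
--         lista_diagramar.append(resultado)
--
--     envelope= list()
--     diagramacao = dict()
--     contador = 1
--     linha = 1
--     for objeto in lista_diagramar:
--         if contador == 1:
--             diagramacao[f"linha{linha}"] = [objeto]
--             contador +=1
--         elif contador == 2: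
--             diagramacao[f"linha{linha}"].append(objeto)
--             contador +=1
--         elif contador == 3:
--             diagramacao[f"linha{linha}"].append(objeto)
--             linha += 1
--             contador = 1
--
--         envelope.append(diagramacao)
--
--     return diagramacao
-- ===== SOURCE B (Python) =====
-- def gerarDiagramacao(lista):
--     """Group the items of `lista` into rows of three: {'linha1': [...], 'linha2': [...], ...}."""
--     lst = list(lista)
--     diagramacao = {}
--     for i in range(0, len(lst), 3):
--         diagramacao[f"linha{i // 3 + 1}"] = lst[i:i + 3]
--     return diagramacao
-- ===== Notes on version B (the rewrite author's own statement) =====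
-- stated objective: simpler
-- what changed: Replaces A's per-element contador/linha state machine (and its dead 'envelope' accumulator) with a single index-stepped loop over range(0, len, 3) that assigns each row by slicing lst[i:i+3] under the key linha{i//3+1}.
import Mathlib
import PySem

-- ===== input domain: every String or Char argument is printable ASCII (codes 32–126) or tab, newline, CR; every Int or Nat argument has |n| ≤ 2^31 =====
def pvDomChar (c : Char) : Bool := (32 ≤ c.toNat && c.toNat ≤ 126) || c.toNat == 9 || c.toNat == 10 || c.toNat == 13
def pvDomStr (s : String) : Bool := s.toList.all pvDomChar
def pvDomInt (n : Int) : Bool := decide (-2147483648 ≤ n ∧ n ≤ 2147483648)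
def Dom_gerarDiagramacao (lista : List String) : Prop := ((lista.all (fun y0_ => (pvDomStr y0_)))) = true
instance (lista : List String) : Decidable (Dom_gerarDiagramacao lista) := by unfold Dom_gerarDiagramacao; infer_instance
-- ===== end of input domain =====

-- B replaces A's per-element contador/linha state machine (and dead 'envelope' list) with one
-- index-stepped loop over range(0, len, 3) assigning each row by slicing — simpler decomposition.


-- ===== PORT A =====
-- loop body of A's second for-loop; state = (diagramacao, contador, linha).
-- `diagramacao[f"linha{linha}"].append(objeto)` is ported as Dict.modify with default []: exact,
-- since at contador∈{2,3} the key "linha{linha}" is always present (it was inserted at contador=1).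
def pvStepA (s : PySem.Dict String (List String) × Int × Int) (objeto : String) :
    PySem.Dict String (List String) × Int × Int :=
  let d := s.1
  let contador := s.2.1
  let linha := s.2.2
  if contador == 1 then
    (d.insert ("linha" ++ PySem.Int.toStr linha) [objeto], contador + 1, linha)
  else if contador == 2 then
    (d.modify ("linha" ++ PySem.Int.toStr linha) [] (fun v => v ++ [objeto]), contador + 1, linha)
  else if contador == 3 then
    (d.modify ("linha" ++ PySem.Int.toStr linha) [] (fun v => v ++ [objeto]), 1, linha + 1)
  else (d, contador, linha)

-- A's 'envelope' list only accumulates aliases of the dict and is never returned; it carries no state.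
def gerarDiagramacao (lista : List String) : List (String × List String) :=
  let lista_diagramar := lista.foldl (fun acc resultado => acc ++ [resultado]) []
  let st := lista_diagramar.foldl pvStepA (PySem.Dict.empty, 1, 1)
  st.1.items

-- ===== PORT B =====
-- loop body of B: diagramacao[f"linha{i // 3 + 1}"] = lst[i:i + 3]
def pvStepB (lst : List String) (d : PySem.Dict String (List String)) (i : Int) :
    PySem.Dict String (List String) :=
  d.insert ("linha" ++ PySem.Int.toStr (PySem.Int.floordiv i 3 + 1)) (PySem.List.slice lst (some i) (some (i + 3)))

def gerarDiagramacao_alt (lista : List String) : List (String × List String) :=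
  let lst := lista
  ((PySem.List.pyRange 0 lst.length 3).foldl (pvStepB lst) PySem.Dict.empty).items

-- ===== PRECONDITION & SPEC =====
def Spec_gerarDiagramacao (lista : List String) (out : List (String × List String)) : Prop := out = gerarDiagramacao_alt lista
instance (lista : List String) (out : List (String × List String)) : Decidable (Spec_gerarDiagramacao lista out) := by unfold Spec_gerarDiagramacao; infer_instance

-- ===== CLAIM (what is proved, stated in full; the proofs are below) =====
def Claim_equal_gerarDiagramacao : Prop := ∀ (lista : List String), Dom_gerarDiagramacao lista → Spec_gerarDiagramacao lista (gerarDiagramacao lista)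

-- ===== LEMMAS AND PROOFS =====

-- the common normal form: the rows both programs produce, three items per row, keys linha{n}, linha{n+1}, …
def pvRows : List String → Int → List (String × List String)
  | [], _ => []
  | [a], n => [("linha" ++ PySem.Int.toStr n, [a])]
  | [a, b], n => [("linha" ++ PySem.Int.toStr n, [a, b])]
  | a :: b :: c :: t, n => ("linha" ++ PySem.Int.toStr n, [a, b, c]) :: pvRows t (n + 1)

theorem pvDigitChar_inj {a b : Nat} (ha : a < 10) (hb : b < 10)
    (h : Nat.digitChar a = Nat.digitChar b) : a = b := by
  interval_cases a <;> interval_cases b <;> first | rfl | exact absurd h (by decide)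

theorem pvToDigits10_inj (a b : Nat) (h : Nat.toDigits 10 a = Nat.toDigits 10 b) : a = b := by
  induction a using Nat.strong_induction_on generalizing b with
  | _ a ih =>
    by_cases ha : a < 10 <;> by_cases hb : b < 10
    · rw [Nat.toDigits_of_lt_base ha, Nat.toDigits_of_lt_base hb] at h
      exact pvDigitChar_inj ha hb (List.cons_eq_cons.mp h).1
    · rw [Nat.toDigits_of_lt_base ha, Nat.toDigits_eq_if (by norm_num), if_neg hb] at h
      have hlen := congrArg List.length h
      simp only [List.length_cons, List.length_nil, List.length_append] at hlen
      have := @Nat.length_toDigits_pos 10 (b / 10)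
      omega
    · rw [Nat.toDigits_of_lt_base hb, Nat.toDigits_eq_if (by norm_num), if_neg ha] at h
      have hlen := congrArg List.length h
      simp only [List.length_cons, List.length_nil, List.length_append] at hlen
      have := @Nat.length_toDigits_pos 10 (a / 10)
      omega
    · have ea : Nat.toDigits 10 a = Nat.toDigits 10 (a / 10) ++ [(a % 10).digitChar] := by
        rw [Nat.toDigits_eq_if (by norm_num), if_neg ha]
      have eb : Nat.toDigits 10 b = Nat.toDigits 10 (b / 10) ++ [(b % 10).digitChar] := by
        rw [Nat.toDigits_eq_if (by norm_num), if_neg hb]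
      rw [ea, eb, ← List.concat_eq_append, ← List.concat_eq_append] at h
      obtain ⟨h1, h2⟩ := List.concat_inj.mp h
      have hdiv : a / 10 = b / 10 := ih (a / 10) (by omega) _ h1
      have hmod : a % 10 = b % 10 :=
        pvDigitChar_inj (Nat.mod_lt _ (by norm_num)) (Nat.mod_lt _ (by norm_num)) h2
      omega

theorem pvKey_inj {a b : Int} (ha : 1 ≤ a) (hb : 1 ≤ b)
    (h : "linha" ++ PySem.Int.toStr a = "linha" ++ PySem.Int.toStr b) : a = b := by
  have h' := congrArg String.toList h
  simp [PySem.Int.toList_toStr] at h'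
  unfold PySem.Int.toChars at h'
  rw [if_neg (by omega), if_neg (by omega)] at h'
  have := pvToDigits10_inj _ _ h'
  omega

-- A-side: a fold of pvStepA started at contador = 1 from a dict with no key "linha{m}", m ≥ linha,
-- appends exactly pvRows.
theorem pvLemA (N : Nat) : ∀ (l : List String), l.length ≤ N →
    ∀ (d : PySem.Dict String (List String)) (n : Int), 1 ≤ n →
    (∀ m : Int, n ≤ m → d.contains ("linha" ++ PySem.Int.toStr m) = false) →
    ((l.foldl pvStepA (d, 1, n)).1).items = d.items ++ pvRows l n := by
  induction N with
  | zero =>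
    intro l hl d n _ _
    have : l = [] := List.eq_nil_of_length_eq_zero (by omega)
    subst this; simp [pvRows]
  | succ N ih =>
    intro l hl d n hn hfresh
    match l with
    | [] => simp [pvRows]
    | [a] =>
      simp only [List.foldl, pvStepA]
      norm_num
      rw [PySem.Dict.items_insert_of_not_contains _ _ (hfresh n le_rfl)]
      simp [pvRows]
    | [a, b] =>
      simp only [List.foldl, pvStepA]
      norm_num
      simp only [PySem.Dict.modify, PySem.Dict.getD_insert_self, PySem.Dict.insert_insert_self]
      rw [PySem.Dict.items_insert_of_not_contains _ _ (hfresh n le_rfl)]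
      simp [pvRows]
    | a :: b :: c :: t =>
      simp only [List.foldl, pvStepA]
      norm_num
      simp only [PySem.Dict.modify, PySem.Dict.getD_insert_self, PySem.Dict.insert_insert_self]
      rw [ih t (by simp at hl ⊢; omega) _ (n + 1) (by omega) ?_]
      · rw [PySem.Dict.items_insert_of_not_contains _ _ (hfresh n le_rfl)]
        simp [pvRows]
      · intro m hm
        rw [PySem.Dict.contains_insert]
        have h1 : d.contains ("linha" ++ PySem.Int.toStr m) = false := hfresh m (by omega)
        have h2 : ("linha" ++ PySem.Int.toStr m) ≠ ("linha" ++ PySem.Int.toStr n) := by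
          intro he; have := pvKey_inj (by omega) hn he; omega
        simp [h1, h2]

-- range with step 3 peels its first element
theorem pvPyRange3_cons (a b : Int) (h : a < b) :
    PySem.List.pyRange a b 3 = a :: PySem.List.pyRange (a + 3) b 3 := by
  rw [PySem.List.pyRange_of_pos _ _ (by norm_num : (0:Int) < 3),
      PySem.List.pyRange_of_pos _ _ (by norm_num : (0:Int) < 3)]
  have e1 : (b - a + 3 - 1) / 3 = (b - a - 1) / 3 + 1 := by
    have e : b - a + 3 - 1 = (b - a - 1) + 1 * 3 := by ring
    rw [e, Int.add_mul_ediv_right _ _ (by norm_num)]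
  have hnn : 0 ≤ (b - a - 1) / 3 := Int.ediv_nonneg (by omega) (by norm_num)
  rw [if_pos h, e1, show ((b - a - 1) / 3 + 1).toNat = ((b - a - 1) / 3).toNat + 1 by omega,
      List.range_succ_eq_map, List.map_cons, List.map_map]
  by_cases h3 : a + 3 < b
  · rw [if_pos h3, show b - (a + 3) + 3 - 1 = b - a - 1 by ring]
    refine List.cons_eq_cons.mpr ⟨by norm_num, ?_⟩
    apply List.map_congr_left
    intro k _
    simp [Function.comp]
    ring
  · rw [if_neg h3, show (b - a - 1) / 3 = 0 from Int.ediv_eq_zero_of_lt (by omega) (by omega)]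
    norm_num

theorem pvPyRange3_nil (a b : Int) (h : b ≤ a) : PySem.List.pyRange a b 3 = [] := by
  rw [PySem.List.pyRange_of_pos _ _ (by norm_num : (0:Int) < 3), if_neg (by omega)]
  simp

-- B-side: the fold of pvStepB over range(3j, len, 3) appends pvRows of the remaining suffix.
theorem pvLemB (N : Nat) : ∀ (t : List String), t.length ≤ N →
    ∀ (l : List String) (j : Nat) (d : PySem.Dict String (List String)),
    t = l.drop (3 * j) →
    (∀ m : Int, (j : Int) + 1 ≤ m → d.contains ("linha" ++ PySem.Int.toStr m) = false) →
    ((PySem.List.pyRange (3 * (j : Int)) l.length 3).foldl (pvStepB l) d).items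
      = d.items ++ pvRows t ((j : Int) + 1) := by
  induction N with
  | zero =>
    intro t ht l j d hdrop _
    have ht0 : t = [] := List.eq_nil_of_length_eq_zero (by omega)
    have hlen : l.length ≤ 3 * j := by
      have := congrArg List.length hdrop
      simp [ht0] at this; omega
    rw [pvPyRange3_nil _ _ (by exact_mod_cast hlen)]
    simp [ht0, pvRows]
  | succ N ih =>
    intro t ht l j d hdrop hfresh
    match t, ht, hdrop with
    | [], ht, hdrop =>
      have hlen : l.length ≤ 3 * j := by
        have := congrArg List.length hdrop
        simp at this; omega
      rw [pvPyRange3_nil _ _ (by exact_mod_cast hlen)]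
      simp [pvRows]
    | x :: t', ht, hdrop =>
      have hlt : 3 * j < l.length := by
        by_contra hc
        rw [List.drop_eq_nil_of_le (by omega)] at hdrop
        exact (List.cons_ne_nil x t') hdrop
      rw [pvPyRange3_cons _ _ (by exact_mod_cast hlt)]
      simp only [List.foldl, pvStepB]
      have hdivk : PySem.Int.floordiv (3 * (j : Int)) 3 + 1 = (j : Int) + 1 := by
        rw [show (3 * (j : Int)) = ((3 * j : Nat) : Int) by push_cast; ring,
            show (3 : Int) = ((3 : Nat) : Int) from rfl, PySem.Int.floordiv_natCast]
        norm_num [Nat.mul_div_cancel_left]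
      have hslice : PySem.List.slice l (some (3 * (j : Int))) (some (3 * (j : Int) + 3))
          = x :: t'.take 2 := by
        rw [show (3 * (j : Int)) = ((3 * j : Nat) : Int) by push_cast; ring,
            show ((3 * j : Nat) : Int) + 3 = ((3 * j + 3 : Nat) : Int) by push_cast; ring,
            PySem.List.slice_natCast, show 3 * j + 3 - 3 * j = 3 by omega, ← hdrop]
        simp
      rw [hdivk, hslice]
      have hfr : d.contains ("linha" ++ PySem.Int.toStr ((j : Int) + 1)) = false :=
        hfresh _ le_rfl
      rw [show 3 * (j : Int) + 3 = 3 * ((j + 1 : Nat) : Int) by push_cast; ring]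
      rw [ih (t'.drop 2) (by simp at ht ⊢; omega) l (j + 1) _ ?_ ?_]
      · rw [PySem.Dict.items_insert_of_not_contains _ _ hfr]
        rcases t' with _ | ⟨y, _ | ⟨z, t''⟩⟩ <;> simp [pvRows]
      · rw [show 3 * (j + 1) = 3 * j + 3 by ring, ← List.drop_drop, ← hdrop]
        simp
      · intro m hm
        rw [PySem.Dict.contains_insert]
        have h1 : d.contains ("linha" ++ PySem.Int.toStr m) = false := by
          apply hfresh; push_cast at hm ⊢; omega
        have h2 : ("linha" ++ PySem.Int.toStr m) ≠ ("linha" ++ PySem.Int.toStr ((j : Int) + 1)) := by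
          intro he
          have := pvKey_inj (by push_cast at hm ⊢; omega) (by omega) he
          push_cast at hm; omega
        simp [h1, h2]

-- ===== VERDICT (by name: the statement is the Claim_ definition above) =====
theorem gerarDiagramacao_spec : Claim_equal_gerarDiagramacao := by
  intro lista _
  unfold Spec_gerarDiagramacao gerarDiagramacao gerarDiagramacao_alt
  dsimp only
  rw [PySem.List.foldl_append_singleton, List.nil_append]
  rw [pvLemA lista.length lista le_rfl PySem.Dict.empty 1 le_rfl
        (fun m _ => PySem.Dict.contains_empty _)]
  have hB := pvLemB lista.length lista le_rfl lista 0 PySem.Dict.empty (by simp)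
      (fun m _ => PySem.Dict.contains_empty _)
  norm_num at hB
  rw [hB]
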